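-- pv_equiv track=rewrite | github.com/dddmmiao/resume-projects | k线大屏/quantify-master/backend/app/strategies/expma_bury.py | _parse_labels_to_periods
-- ===== SOURCE A (Python) =====
-- from typing import Dict, Any, List, Optional
--
-- def _parse_labels_to_periods(labels: List[str], default: List[int]) -> List[int]:
--     """解析标签列表为周期数组（与旧 StrategyRegistry 行为保持一致）。"""
--     if not labels:
--         return default
--
--     mapping = {"a1": 5, "a2": 10, "a3": 20, "a4": 60, "a5": 250}
--     valid_values = [5, 10, 20, 60, 250]
--
--     parsed = [mapping.get(label, 0) for label in labels if label in mapping]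
--     parsed = [x for x in parsed if x in valid_values]
--
--     return sorted(list(set(parsed))) if parsed else default
-- ===== SOURCE B (Python) =====
-- def _parse_labels_to_periods(labels, default):
--     """Collect mapping values by walking the fixed key universe in value order:
--     the result is deduped and ascending by construction (no set-of-values, no sort)."""
--     label_set = set(labels)
--     mapping = {"a1": 5, "a2": 10, "a3": 20, "a4": 60, "a5": 250}
--     out = [v for k, v in mapping.items() if k in label_set]
--     return out if out else default
-- ===== Notes on version B (the rewrite author's own statement) =====
-- stated objective: simpler
-- what changed: B iterates the fixed five-key mapping once against a precomputed set of the labels, so the result is deduped and ascending by construction, eliminating A's per-label dict lookups, the value-validity filter, set(parsed) and sorted().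
import Mathlib
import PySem

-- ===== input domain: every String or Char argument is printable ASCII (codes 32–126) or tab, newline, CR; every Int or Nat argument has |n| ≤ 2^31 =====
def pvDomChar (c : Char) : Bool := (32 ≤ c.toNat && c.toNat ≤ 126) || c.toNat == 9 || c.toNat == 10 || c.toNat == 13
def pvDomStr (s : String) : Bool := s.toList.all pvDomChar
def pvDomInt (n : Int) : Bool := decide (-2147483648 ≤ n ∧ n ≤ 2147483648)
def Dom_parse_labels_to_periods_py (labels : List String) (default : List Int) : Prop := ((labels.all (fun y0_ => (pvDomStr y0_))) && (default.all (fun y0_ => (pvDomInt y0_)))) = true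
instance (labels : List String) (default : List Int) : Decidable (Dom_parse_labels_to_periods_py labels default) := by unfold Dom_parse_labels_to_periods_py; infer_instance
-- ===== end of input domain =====

-- B walks the fixed, value-ordered five-key mapping once against a set of the labels, so the
-- result is deduped and ascending by construction — no per-label lookups, no set(values), no sort.

-- ===== PORT A =====
def parse_labels_to_periods_py (labels : List String) (default : List Int) : List Int :=
  if labels = [] then default
  else
    let mapping : PySem.Dict String Int :=
      PySem.Dict.ofList [("a1", 5), ("a2", 10), ("a3", 20), ("a4", 60), ("a5", 250)]
    let valid_values : List Int := [5, 10, 20, 60, 250]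
    let parsed : List Int :=
      (labels.filter (fun label => mapping.contains label)).map (fun label => mapping.getD label 0)
    let parsed2 : List Int := parsed.filter (fun x => valid_values.contains x)
    if parsed2 ≠ [] then PySem.List.sorted (PySem.Set.ofList parsed2) (fun x => x) false
    else default

-- ===== PORT B =====
def parse_labels_to_periods_py_alt (labels : List String) (default : List Int) : List Int :=
  let label_set : PySem.Set String := PySem.Set.ofList labels
  let mapping : List (String × Int) := [("a1", 5), ("a2", 10), ("a3", 20), ("a4", 60), ("a5", 250)]
  let out : List Int := (mapping.filter (fun kv => label_set.contains kv.1)).map (fun kv => kv.2)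
  if out = [] then default else out

-- ===== PRECONDITION & SPEC =====
def Spec_parse_labels_to_periods_py (labels : List String) (default : List Int) (out : List Int) : Prop := out = parse_labels_to_periods_py_alt labels default
instance (labels : List String) (default : List Int) (out : List Int) : Decidable (Spec_parse_labels_to_periods_py labels default out) := by unfold Spec_parse_labels_to_periods_py; infer_instance

-- ===== CLAIM (what is proved, stated in full; the proofs are below) =====
def Claim_equal_parse_labels_to_periods_py : Prop := ∀ (labels : List String) (default : List Int), Dom_parse_labels_to_periods_py labels default → Spec_parse_labels_to_periods_py labels default (parse_labels_to_periods_py labels default)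

-- ===== LEMMAS AND PROOFS =====

-- the literal mapping / key universe shared by both ports, and named abbreviations
-- for A's filtered value list and B's output list (used only by the proofs)
def pvKvs : List (String × Int) := [("a1", 5), ("a2", 10), ("a3", 20), ("a4", 60), ("a5", 250)]

def pvParsed2 (labels : List String) : List Int :=
  ((labels.filter (fun l => (PySem.Dict.ofList pvKvs).contains l)).map
      (fun l => (PySem.Dict.ofList pvKvs).getD l 0)).filter
      (fun x => ([5, 10, 20, 60, 250] : List Int).contains x)

def pvOut (labels : List String) : List Int :=
  (pvKvs.filter (fun kv => (PySem.Set.ofList labels).contains kv.1)).map (fun kv => kv.2)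

lemma pvA_eq (labels : List String) (default : List Int) :
    parse_labels_to_periods_py labels default =
      if labels = [] then default
      else if pvParsed2 labels ≠ [] then
        PySem.List.sorted (PySem.Set.ofList (pvParsed2 labels)) (fun x => x) false
      else default := rfl

lemma pvB_eq (labels : List String) (default : List Int) :
    parse_labels_to_periods_py_alt labels default =
      if pvOut labels = [] then default else pvOut labels := rfl

lemma pvOut_nil (labels : List String) (h : labels = []) : pvOut labels = [] := by
  subst h; rfl

lemma pvKeys : (PySem.Dict.ofList pvKvs).keys = ["a1", "a2", "a3", "a4", "a5"] := by decide

lemma pvContains (l : String) :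
    (PySem.Dict.ofList pvKvs).contains l = true ↔ l ∈ ["a1", "a2", "a3", "a4", "a5"] := by
  rw [PySem.Dict.contains_eq_decide_mem_keys, pvKeys]; simp

-- membership in A's parsed list (before the validity filter)
lemma pvMemParsed (labels : List String) (x : Int) :
    x ∈ ((labels.filter (fun l => (PySem.Dict.ofList pvKvs).contains l)).map
          (fun l => (PySem.Dict.ofList pvKvs).getD l 0)) ↔
    ∃ kv ∈ pvKvs, kv.1 ∈ labels ∧ kv.2 = x := by
  simp only [List.mem_map, List.mem_filter]
  constructor
  · rintro ⟨l, ⟨hl, hc⟩, rfl⟩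
    have hm := (pvContains l).mp hc
    fin_cases hm
    · exact ⟨("a1", 5), by norm_num [pvKvs], hl, by decide⟩
    · exact ⟨("a2", 10), by norm_num [pvKvs], hl, by decide⟩
    · exact ⟨("a3", 20), by norm_num [pvKvs], hl, by decide⟩
    · exact ⟨("a4", 60), by norm_num [pvKvs], hl, by decide⟩
    · exact ⟨("a5", 250), by norm_num [pvKvs], hl, by decide⟩
  · rintro ⟨kv, hkv, hl, rfl⟩
    refine ⟨kv.1, ⟨hl, ?_⟩, ?_⟩ <;> fin_cases hkv <;> decide

-- every value produced through the mapping is one of the valid values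
lemma pvMemParsed2 (labels : List String) (x : Int) :
    x ∈ pvParsed2 labels ↔ ∃ kv ∈ pvKvs, kv.1 ∈ labels ∧ kv.2 = x := by
  unfold pvParsed2
  rw [List.mem_filter]
  constructor
  · rintro ⟨h, -⟩; exact (pvMemParsed labels x).mp h
  · intro h
    refine ⟨(pvMemParsed labels x).mpr h, ?_⟩
    obtain ⟨kv, hkv, -, rfl⟩ := h
    fin_cases hkv <;> decide

-- membership in B's output list
lemma pvMemOut (labels : List String) (x : Int) :
    x ∈ pvOut labels ↔ ∃ kv ∈ pvKvs, kv.1 ∈ labels ∧ kv.2 = x := by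
  unfold pvOut
  simp only [List.mem_map, List.mem_filter, PySem.Set.contains, List.contains_iff_mem,
    PySem.Set.mem_ofList]
  constructor
  · rintro ⟨kv, ⟨hkv, hl⟩, rfl⟩; exact ⟨kv, hkv, hl, rfl⟩
  · rintro ⟨kv, hkv, hl, rfl⟩; exact ⟨kv, ⟨hkv, hl⟩, rfl⟩

-- B's output is a sublist of the ascending value universe
lemma pvOutSublist (labels : List String) :
    (pvOut labels).Sublist ([5, 10, 20, 60, 250] : List Int) := by
  unfold pvOut
  have h : (pvKvs.filter (fun kv => (PySem.Set.ofList labels).contains kv.1)).Sublist pvKvs :=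
    List.filter_sublist
  simpa [pvKvs] using h.map (fun kv : String × Int => kv.2)

lemma pvMain (labels : List String) (default : List Int) :
    parse_labels_to_periods_py labels default = parse_labels_to_periods_py_alt labels default := by
  rw [pvA_eq, pvB_eq]
  have hmem : ∀ x, x ∈ pvParsed2 labels ↔ x ∈ pvOut labels := fun x =>
    (pvMemParsed2 labels x).trans (pvMemOut labels x).symm
  by_cases hno : pvOut labels = []
  · have hp : pvParsed2 labels = [] := by
      rw [List.eq_nil_iff_forall_not_mem]
      intro x hx
      exact (List.eq_nil_iff_forall_not_mem.mp hno x) ((hmem x).mp hx)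
    rw [if_pos hno]
    by_cases hl : labels = []
    · rw [if_pos hl]
    · rw [if_neg hl, if_neg (fun h => h hp)]
  · have hlab : labels ≠ [] := fun h => hno (pvOut_nil labels h)
    have hp : pvParsed2 labels ≠ [] := by
      intro hp
      rcases List.exists_mem_of_ne_nil (pvOut labels) hno with ⟨x, hx⟩
      exact (List.eq_nil_iff_forall_not_mem.mp hp x) ((hmem x).mpr hx)
    rw [if_neg hlab, if_pos hp, if_neg hno]
    have hsub : (pvOut labels).Sublist ([5, 10, 20, 60, 250] : List Int) := pvOutSublist labels
    have hpw : (pvOut labels).Pairwise (fun a b : Int => a < b) :=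
      List.Pairwise.sublist hsub (by decide)
    have hnodup : (pvOut labels).Nodup := hpw.imp ne_of_lt
    have hperm : (pvOut labels).Perm (PySem.Set.ofList (pvParsed2 labels)) := by
      rw [List.perm_ext_iff_of_nodup hnodup (PySem.Set.nodup_ofList (pvParsed2 labels))]
      intro x
      rw [PySem.Set.mem_ofList]
      exact (hmem x).symm
    exact PySem.List.sorted_eq_of_perm_of_pairwise_lt _ _ _ hperm hpw

-- ===== VERDICT (by name: the statement is the Claim_ definition above) =====
theorem parse_labels_to_periods_py_spec : Claim_equal_parse_labels_to_periods_py := by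
  intro labels default _
  unfold Spec_parse_labels_to_periods_py
  exact pvMain labels default
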